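-- pv_equiv track=rewrite | github.com/ExusiaiVAL/BENG0095_T1 | 2V24M.py | fill_diag_missing
-- ===== SOURCE A (Python) =====
-- def fill_diag_missing(row):
--     diags = [row['diag_1'], row['diag_2'], row['diag_3']]
--     valid_diags = []
--
--     # Store non-missing values for later index and Fill
--     for d in diags:
--         if d != "Unknown":
--             valid_diags.append(d)
--
--     # Fill based on the number, index of valid values
--     if len(valid_diags) == 1:
--         # Given 1 combination: E1 NaN NaN, or E1 at any other element --> After Refine = E1 E1 E1
--         filled_diags = [valid_diags[0], valid_diags[0], valid_diags[0]]
--     elif len(valid_diags) == 2: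
--         idx = diags.index("Unknown")
--         # Index the missing element, given total 2 combinations: 1: E1 E2 NaN --> After Refine = E1 E2 E2
--                                                                # 2: E1 NaN E2 --> After Refine = E1 E1 E2
--                                                                # or NaN E1 E2 --> After Refine = E1 E1 E2 (E1's idx=0, same case as above)
--         if idx == 2:
--             filled_diags = [valid_diags[0], valid_diags[1], valid_diags[1]]
--         else:
--             filled_diags = [valid_diags[0], valid_diags[0], valid_diags[1]]
--     else:
--         filled_diags = diags
--
--     return filled_diags
-- ===== SOURCE B (Python) =====
-- def _ffill(xs):
--     # forward fill: replace each "Unknown" by the last valid value seen (if any)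
--     res = []
--     last = None
--     for x in xs:
--         if x == "Unknown" and last is not None:
--             res.append(last)
--         else:
--             res.append(x)
--             if x != "Unknown":
--                 last = x
--     return res
--
--
-- def fill_diag_missing(row):
--     diags = [row['diag_1'], row['diag_2'], row['diag_3']]
--     out = _ffill(diags)                 # fills toward the right (ties go to the previous value)
--     out = _ffill(out[::-1])[::-1]       # backward fill any remaining leading "Unknown"s
--     return out
-- ===== Notes on version B (the rewrite author's own statement) =====
-- stated objective: idiomatic
-- what changed: Replaces A's case analysis on the count and position of missing values by a generic forward-fill pass followed by a backward-fill pass (forward first, so ties go to the previous value).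
import Mathlib
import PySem

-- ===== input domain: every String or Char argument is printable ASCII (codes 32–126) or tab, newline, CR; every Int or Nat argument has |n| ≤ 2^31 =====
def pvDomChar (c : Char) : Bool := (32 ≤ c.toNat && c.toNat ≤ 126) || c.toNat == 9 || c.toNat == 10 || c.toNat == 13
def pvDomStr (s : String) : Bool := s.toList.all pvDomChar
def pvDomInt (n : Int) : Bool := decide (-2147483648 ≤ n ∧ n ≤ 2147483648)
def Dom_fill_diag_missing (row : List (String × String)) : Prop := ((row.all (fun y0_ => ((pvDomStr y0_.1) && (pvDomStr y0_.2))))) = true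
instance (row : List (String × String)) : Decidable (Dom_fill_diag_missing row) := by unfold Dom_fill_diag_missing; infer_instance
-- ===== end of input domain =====

-- B replaces A's case analysis on the count/position of "Unknown" by a forward-fill pass then a backward-fill pass (idiomatic; same result).

-- ===== PORT A =====
def fill_diag_missing (row : List (String × String)) : List String :=
  let d1 := (List.lookup "diag_1" row).getD ""   -- Pre_ guarantees the keys exist (Python would raise KeyError)
  let d2 := (List.lookup "diag_2" row).getD ""
  let d3 := (List.lookup "diag_3" row).getD ""
  let diags : List String := [d1, d2, d3]
  let valid_diags : List String :=
    diags.foldl (fun acc d => if d ≠ "Unknown" then acc ++ [d] else acc) []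
  if valid_diags.length = 1 then
    [valid_diags[0]!, valid_diags[0]!, valid_diags[0]!]
  else if valid_diags.length = 2 then
    let idx := (PySem.List.index? diags "Unknown").getD 0   -- some: exactly one "Unknown" is present here
    if idx = 2 then [valid_diags[0]!, valid_diags[1]!, valid_diags[1]!]
    else [valid_diags[0]!, valid_diags[0]!, valid_diags[1]!]
  else diags

-- ===== PORT B =====
-- forward fill: replace each "Unknown" by the last valid value seen (if any)
def pvFfill (last : Option String) : List String → List String
  | [] => []
  | x :: xs =>
    if x = "Unknown" then
      match last with
      | some v => v :: pvFfill (some v) xs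
      | none => x :: pvFfill none xs
    else x :: pvFfill (some x) xs

def fill_diag_missing_alt (row : List (String × String)) : List String :=
  let d1 := (List.lookup "diag_1" row).getD ""
  let d2 := (List.lookup "diag_2" row).getD ""
  let d3 := (List.lookup "diag_3" row).getD ""
  let diags : List String := [d1, d2, d3]
  let out := pvFfill none diags
  (pvFfill none out.reverse).reverse

-- ===== PRECONDITION & SPEC =====
-- Pre_: the three diagnosis keys are present (Python A raises KeyError otherwise).
def Pre_fill_diag_missing (row : List (String × String)) : Prop :=
  (List.lookup "diag_1" row).isSome = true ∧
  (List.lookup "diag_2" row).isSome = true ∧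
  (List.lookup "diag_3" row).isSome = true
instance (row : List (String × String)) : Decidable (Pre_fill_diag_missing row) := by
  unfold Pre_fill_diag_missing; infer_instance

def pvWitness_fill_diag_missing : (List (String × String)) :=
  [("diag_1", "250"), ("diag_2", "Unknown"), ("diag_3", "401")]

def Spec_fill_diag_missing (row : List (String × String)) (out : List String) : Prop := out = fill_diag_missing_alt row
instance (row : List (String × String)) (out : List String) : Decidable (Spec_fill_diag_missing row out) := by unfold Spec_fill_diag_missing; infer_instance

-- ===== CLAIM (what is proved, stated in full; the proofs are below) =====
def Claim_equal_fill_diag_missing : Prop := ∀ (row : List (String × String)), Dom_fill_diag_missing row → Pre_fill_diag_missing row → Spec_fill_diag_missing row (fill_diag_missing row)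

-- ===== LEMMAS AND PROOFS =====

-- On any three strings, A's case analysis and B's two fill passes agree.
theorem pv_core (d1 d2 d3 : String) :
    (let diags : List String := [d1, d2, d3]
     let valid_diags : List String :=
       diags.foldl (fun acc d => if d ≠ "Unknown" then acc ++ [d] else acc) []
     if valid_diags.length = 1 then
       [valid_diags[0]!, valid_diags[0]!, valid_diags[0]!]
     else if valid_diags.length = 2 then
       let idx := (PySem.List.index? diags "Unknown").getD 0
       if idx = 2 then [valid_diags[0]!, valid_diags[1]!, valid_diags[1]!]
       else [valid_diags[0]!, valid_diags[0]!, valid_diags[1]!]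
     else diags)
    = (let diags : List String := [d1, d2, d3]
       let out := pvFfill none diags
       (pvFfill none out.reverse).reverse) := by
  by_cases h1 : d1 = "Unknown" <;> by_cases h2 : d2 = "Unknown" <;> by_cases h3 : d3 = "Unknown" <;>
    simp [pvFfill, PySem.List.index?_eq_idxOf?, List.idxOf?, List.findIdx?, List.findIdx?.go, h1, h2, h3, List.foldl]

-- ===== VERDICT (by name: the statement is the Claim_ definition above) =====
theorem fill_diag_missing_spec : Claim_equal_fill_diag_missing := by
  intro row _ _
  unfold Spec_fill_diag_missing fill_diag_missing fill_diag_missing_alt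
  exact pv_core _ _ _
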